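-- pv_equiv track=rewrite | github.com/kristenbestavros/bu-cds-llms-sp26-portfolio-piece-1-portfolio-piece-KristenBestavros | anagrammer/src/phonotactics.py | _count_trailing
-- ===== SOURCE A (Python) =====
-- def _count_trailing(s, char_set):
--     """Count how many trailing characters belong to char_set."""
--     count = 0
--     for c in reversed(s):
--         if c in char_set:
--             count += 1
--         else:
--             break
--     return count
-- ===== SOURCE B (Python) =====
-- def _count_trailing(s, char_set):
--     """Count how many trailing characters belong to char_set."""
--     count = 0
--     for c in s:
--         count = count + 1 if c in char_set else 0
--     return count
-- ===== Notes on version B (the rewrite author's own statement) =====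
-- stated objective: alternative
-- what changed: Single forward pass that resets a running counter on every non-member, instead of scanning reversed(s) with an early break.
import Mathlib
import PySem

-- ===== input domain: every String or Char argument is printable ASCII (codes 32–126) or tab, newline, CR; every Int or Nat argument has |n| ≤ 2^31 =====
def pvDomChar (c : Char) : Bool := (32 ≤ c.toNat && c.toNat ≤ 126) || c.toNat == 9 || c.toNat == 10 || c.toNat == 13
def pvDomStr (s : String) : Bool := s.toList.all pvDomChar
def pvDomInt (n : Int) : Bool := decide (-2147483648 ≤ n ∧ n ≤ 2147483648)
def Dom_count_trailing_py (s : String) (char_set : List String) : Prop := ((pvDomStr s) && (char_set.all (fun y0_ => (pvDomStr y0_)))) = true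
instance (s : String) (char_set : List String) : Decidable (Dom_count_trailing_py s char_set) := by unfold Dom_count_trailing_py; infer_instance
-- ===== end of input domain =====

-- B replaces A's reversed scan with early break by a forward pass that resets a running counter; return values agree everywhere (objective: alternative decomposition).

-- ===== PORT A =====
-- the `for c in reversed(s): if c in char_set: count += 1 else: break` loop, as structural recursion on the reversed character list
def pvGoA (cs : List Char) (char_set : List String) : Int :=
  match cs with
  | [] => 0
  | c :: rest => if String.singleton c ∈ char_set then 1 + pvGoA rest char_set else 0

def count_trailing_py (s : String) (char_set : List String) : Int :=
  pvGoA s.toList.reverse char_set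

-- ===== PORT B =====
def count_trailing_py_alt (s : String) (char_set : List String) : Int :=
  s.toList.foldl (fun count c => if String.singleton c ∈ char_set then count + 1 else 0) 0

-- ===== PRECONDITION & SPEC =====
def Spec_count_trailing_py (s : String) (char_set : List String) (out : Int) : Prop := out = count_trailing_py_alt s char_set
instance (s : String) (char_set : List String) (out : Int) : Decidable (Spec_count_trailing_py s char_set out) := by unfold Spec_count_trailing_py; infer_instance

-- ===== CLAIM (what is proved, stated in full; the proofs are below) =====
def Claim_equal_count_trailing_py : Prop := ∀ (s : String) (char_set : List String), Dom_count_trailing_py s char_set → Spec_count_trailing_py s char_set (count_trailing_py s char_set)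

-- ===== LEMMAS AND PROOFS =====

theorem pvGoA_eq_takeWhile (cs : List Char) (cc : List String) :
    pvGoA cs cc = ((cs.takeWhile (fun c => decide (String.singleton c ∈ cc))).length : Int) := by
  induction cs with
  | nil => simp [pvGoA]
  | cons c rest ih =>
    by_cases h : String.singleton c ∈ cc
    · simp [pvGoA, List.takeWhile, h, ih]; omega
    · simp [pvGoA, List.takeWhile, h]

theorem takeWhile_append_not_all {α : Type} (p : α → Bool) (l l' : List α)
    (h : ¬ ∀ a ∈ l, p a = true) : (l ++ l').takeWhile p = l.takeWhile p := by
  induction l with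
  | nil => exact absurd (by simp) h
  | cons a t ih =>
    by_cases ha : p a = true
    · have ht : ¬ ∀ a ∈ t, p a = true := fun hh => h (by simpa [ha] using hh)
      simp [List.takeWhile, ha, ih ht]
    · simp [List.takeWhile, Bool.eq_false_iff.mpr ha]

theorem takeWhile_append_all {α : Type} (p : α → Bool) (l l' : List α)
    (h : ∀ a ∈ l, p a = true) : (l ++ l').takeWhile p = l ++ l'.takeWhile p := by
  induction l with
  | nil => simp
  | cons a t ih =>
    simp [h a (by simp), ih (fun x hx => h x (by simp [hx]))]

theorem foldl_reset_eq (cc : List String) (cs : List Char) (acc : Int) :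
    cs.foldl (fun count c => if String.singleton c ∈ cc then count + 1 else 0) acc
      = if (∀ c ∈ cs, String.singleton c ∈ cc)
        then acc + cs.length
        else ((cs.reverse.takeWhile (fun c => decide (String.singleton c ∈ cc))).length : Int) := by
  induction cs generalizing acc with
  | nil => simp
  | cons c rest ih =>
    have hmemrev : ∀ {P : Char → Prop}, (∀ a ∈ rest, P a) → (∀ a ∈ rest.reverse, P a) :=
      fun hh a ha => hh a (List.mem_reverse.mp ha)
    have hmemrev' : ∀ {P : Char → Prop}, (∀ a ∈ rest.reverse, P a) → (∀ a ∈ rest, P a) :=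
      fun hh a ha => hh a (List.mem_reverse.mpr ha)
    rw [List.foldl_cons, ih, List.reverse_cons]
    by_cases hc : String.singleton c ∈ cc <;>
      by_cases hr : ∀ x ∈ rest, String.singleton x ∈ cc
    · have hall : ∀ x ∈ c :: rest, String.singleton x ∈ cc := by
        intro x hx
        rcases List.mem_cons.mp hx with h | h
        · exact h ▸ hc
        · exact hr x h
      rw [if_pos hc, if_pos hr, if_pos hall]
      simp only [List.length_cons]
      push_cast; omega
    · have hcons : ¬ ∀ x ∈ c :: rest, String.singleton x ∈ cc :=
        fun hh => hr (fun x hx => hh x (List.mem_cons_of_mem _ hx))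
      have hrr : ¬ ∀ a ∈ rest.reverse, (fun c => decide (String.singleton c ∈ cc)) a = true :=
        fun hh => hr (fun x hx => by simpa using (hmemrev' hh) x hx)
      rw [if_pos hc, if_neg hr, if_neg hcons,
        takeWhile_append_not_all _ rest.reverse [c] hrr]
    · have hcons : ¬ ∀ x ∈ c :: rest, String.singleton x ∈ cc :=
        fun hh => hc (hh c (List.mem_cons_self ..))
      have hrr : ∀ a ∈ rest.reverse, (fun c => decide (String.singleton c ∈ cc)) a = true :=
        hmemrev (fun x hx => by simpa using hr x hx)
      rw [if_neg hc, if_pos hr, if_neg hcons,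
        takeWhile_append_all _ rest.reverse [c] hrr]
      simp [List.takeWhile, hc]
    · have hcons : ¬ ∀ x ∈ c :: rest, String.singleton x ∈ cc :=
        fun hh => hr (fun x hx => hh x (List.mem_cons_of_mem _ hx))
      have hrr : ¬ ∀ a ∈ rest.reverse, (fun c => decide (String.singleton c ∈ cc)) a = true :=
        fun hh => hr (fun x hx => by simpa using (hmemrev' hh) x hx)
      rw [if_neg hc, if_neg hr, if_neg hcons,
        takeWhile_append_not_all _ rest.reverse [c] hrr]

-- ===== VERDICT (by name: the statement is the Claim_ definition above) =====
theorem count_trailing_py_spec : Claim_equal_count_trailing_py := by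
  intro s cc _
  unfold Spec_count_trailing_py count_trailing_py count_trailing_py_alt
  rw [pvGoA_eq_takeWhile, foldl_reset_eq]
  split
  · next h =>
    have : s.toList.reverse.all (fun c => decide (String.singleton c ∈ cc)) = true := by
      simpa [List.all_reverse] using h
    rw [List.takeWhile_eq_self_iff.mpr ?_]
    · simp
    · intro c hcm
      exact (List.all_eq_true.mp this) c hcm
  · rfl
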